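-- pv_equiv track=rewrite | github.com/ARLbenjamin/Killer_Queen | queen_move.py | rigth_move
-- ===== SOURCE A (Python) =====
-- def rigth_move(b, q_p, obs):
--     q_position = list(q_p)
--     m = 0
--     i = q_p[1]
--     while i < b :
--         e = 0
--         q_position[1] = (q_position[1]+1)
--         while e < len(obs):
--             if q_position == obs[e]:
--                 i = b
--             e = e + 1
--         if (not(i == b)):
--             m = m + 1
--         i = i + 1
--     return m
-- ===== SOURCE B (Python) =====
-- def rigth_move(b, q_p, obs):
--     qc = q_p[1]
--     if qc >= b:
--         return 0
--     pre, post = q_p[:1], q_p[2:]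
--     cols = [o[1] for o in obs
--             if len(o) >= 2 and o[:1] == pre and o[2:] == post and qc < o[1] <= b]
--     return min(cols) - qc - 1 if cols else b - qc
-- ===== Notes on version B (the rewrite author's own statement) =====
-- stated objective: faster
-- what changed: Replaces A's square-by-square walk (scanning all of obs at every square) by a single pass over obs collecting columns of matching in-row obstacles within (qc, b], then closed-form arithmetic: min(cols)-qc-1 if any, else b-qc.
import Mathlib
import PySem

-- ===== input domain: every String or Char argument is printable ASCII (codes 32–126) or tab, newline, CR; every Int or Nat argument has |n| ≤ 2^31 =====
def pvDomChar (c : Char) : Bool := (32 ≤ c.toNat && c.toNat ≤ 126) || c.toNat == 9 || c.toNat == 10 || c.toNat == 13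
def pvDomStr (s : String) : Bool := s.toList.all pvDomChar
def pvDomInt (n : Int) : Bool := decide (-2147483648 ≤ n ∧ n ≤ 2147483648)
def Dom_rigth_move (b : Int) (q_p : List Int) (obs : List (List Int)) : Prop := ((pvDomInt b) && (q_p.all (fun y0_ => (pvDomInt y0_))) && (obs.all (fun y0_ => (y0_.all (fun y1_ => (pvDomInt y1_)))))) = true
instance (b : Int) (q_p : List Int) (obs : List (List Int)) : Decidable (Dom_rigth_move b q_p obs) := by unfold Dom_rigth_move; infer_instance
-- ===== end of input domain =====

-- B replaces A's square-by-square walk by one pass over obs plus closed-form arithmetic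
-- (measured faster); equivalence is about the return value (A mutates only its private copy of q_p).

-- ===== PORT A =====
-- inner 'while e < len(obs)' loop of A: sets i to b on a match, otherwise leaves it
def pvInnerA (b : Int) (q : List Int) (obs : List (List Int)) (i : Int) : Int :=
  obs.foldl (fun acc o => if q = o then b else acc) i

-- characterisation of the inner loop; the outer loop's termination proof cites it, hence above the port
theorem pvInnerA_eq (b : Int) (q : List Int) (obs : List (List Int)) (a : Int) :
    pvInnerA b q obs a = if q ∈ obs then b else a := by
  unfold pvInnerA
  induction obs generalizing a with
  | nil => simp
  | cons o t ih =>
    simp only [List.foldl, List.mem_cons]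
    by_cases h : q = o
    · simpa [h] using ih b
    · simp [h, ih]

-- outer 'while i < b' loop of A; state = (q_position, m, i)
def rigth_moveLoop (b : Int) (obs : List (List Int)) (q_position : List Int) (m i : Int) : Int :=
  if i < b then
    -- q_position[1] = q_position[1] + 1  (index 1 in range under Pre_, where len(q_p) ≥ 2)
    let q_position' := q_position.set 1 (PySem.List.pyGetD q_position 1 0 + 1)
    let i' := pvInnerA b q_position' obs i
    let m' := if ¬ (i' = b) then m + 1 else m
    rigth_moveLoop b obs q_position' m' (i' + 1)
  else m
termination_by (b - i).toNat
decreasing_by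
  rw [pvInnerA_eq]
  split <;> omega

def rigth_move (b : Int) (q_p : List Int) (obs : List (List Int)) : Int :=
  let q_position := q_p
  let m : Int := 0
  let i := PySem.List.pyGetD q_p 1 0   -- q_p[1]; exact under Pre_ (2 ≤ len q_p)
  rigth_moveLoop b obs q_position m i

-- ===== PORT B =====
def rigth_move_alt (b : Int) (q_p : List Int) (obs : List (List Int)) : Int :=
  let qc := PySem.List.pyGetD q_p 1 0  -- q_p[1]; exact under Pre_ (2 ≤ len q_p)
  if qc ≥ b then 0
  else
    let pre := PySem.List.slice q_p none (some 1)
    let post := PySem.List.slice q_p (some 2) none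
    let cols := obs.filterMap (fun o =>
      if 2 ≤ o.length ∧ PySem.List.slice o none (some 1) = pre ∧
         PySem.List.slice o (some 2) none = post ∧
         qc < PySem.List.pyGetD o 1 0 ∧ PySem.List.pyGetD o 1 0 ≤ b
      then some (PySem.List.pyGetD o 1 0) else none)
    match PySem.List.min? cols (fun x => x) with
    | some c => c - qc - 1
    | none => b - qc

-- ===== PRECONDITION & SPEC =====
-- Pre_ excludes exactly the inputs where A raises IndexError: q_p shorter than 2 (q_p[1]).
def Pre_rigth_move (b : Int) (q_p : List Int) (obs : List (List Int)) : Prop := 2 ≤ q_p.length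
instance (b : Int) (q_p : List Int) (obs : List (List Int)) : Decidable (Pre_rigth_move b q_p obs) := by unfold Pre_rigth_move; infer_instance
def pvWitness_rigth_move : Int × List Int × List (List Int) := (5, [0, 1], [[0, 4]])

def Spec_rigth_move (b : Int) (q_p : List Int) (obs : List (List Int)) (out : Int) : Prop := out = rigth_move_alt b q_p obs
instance (b : Int) (q_p : List Int) (obs : List (List Int)) (out : Int) : Decidable (Spec_rigth_move b q_p obs out) := by unfold Spec_rigth_move; infer_instance

-- ===== CLAIM (what is proved, stated in full; the proofs are below) =====
def Claim_equal_rigth_move : Prop := ∀ (b : Int) (q_p : List Int) (obs : List (List Int)), Dom_rigth_move b q_p obs → Pre_rigth_move b q_p obs → Spec_rigth_move b q_p obs (rigth_move b q_p obs)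

-- ===== LEMMAS AND PROOFS =====

-- columns of obstacles matching the queen's row pattern, strictly right of column i, within board b
def pvCols (b a : Int) (rest : List Int) (obs : List (List Int)) (i : Int) : List Int :=
  obs.filterMap (fun o =>
    if 2 ≤ o.length ∧ PySem.List.slice o none (some 1) = [a] ∧
       PySem.List.slice o (some 2) none = rest ∧
       i < PySem.List.pyGetD o 1 0 ∧ PySem.List.pyGetD o 1 0 ≤ b
    then some (PySem.List.pyGetD o 1 0) else none)

-- B's answer as a function of the current column
def pvTail (b a : Int) (rest : List Int) (obs : List (List Int)) (i : Int) : Int :=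
  if b ≤ i then 0
  else match PySem.List.min? (pvCols b a rest obs i) (fun x => x) with
    | some c => c - i - 1
    | none => b - i

theorem pvMatchIff (a c : Int) (rest : List Int) (o : List Int) :
    (2 ≤ o.length ∧ PySem.List.slice o none (some 1) = [a] ∧
     PySem.List.slice o (some 2) none = rest ∧ PySem.List.pyGetD o 1 0 = c)
    ↔ o = a :: c :: rest := by
  match o with
  | [] => simp
  | [x] =>
    constructor
    · rintro ⟨h, _⟩; simp at h
    · intro h; simp at h
  | x :: y :: t =>
    have h1 : PySem.List.slice (x :: y :: t) none (some 1) = [x] := by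
      rw [PySem.List.slice_to _ (by norm_num)]; rfl
    have h2 : PySem.List.slice (x :: y :: t) (some 2) none = t := by
      rw [PySem.List.slice_from _ (by norm_num)]; rfl
    have h3 : PySem.List.pyGetD (x :: y :: t) 1 0 = y := by
      simp [PySem.List.pyGetD, PySem.List.pyGet?, PySem.List.pyIdx?]
    rw [h1, h2, h3]
    constructor
    · rintro ⟨_, hx, ht, hy⟩
      simp at hx; simp [hx, hy, ht]
    · intro h
      injection h with hx h; injection h with hy ht
      simp [hx, hy, ht]

theorem pvMemCols (b a : Int) (rest : List Int) (obs : List (List Int)) (i c : Int) :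
    c ∈ pvCols b a rest obs i ↔ ((a :: c :: rest) ∈ obs ∧ i < c ∧ c ≤ b) := by
  unfold pvCols
  simp only [List.mem_filterMap]
  constructor
  · rintro ⟨o, ho, h⟩
    split at h
    · rename_i hcond
      obtain ⟨hl, hpre, hpost, hlt, hle⟩ := hcond
      injection h with hv
      have ho2 : o = a :: c :: rest := (pvMatchIff a c rest o).mp ⟨hl, hpre, hpost, hv⟩
      rw [hv] at hlt hle
      exact ⟨ho2 ▸ ho, hlt, hle⟩
    · simp at h
  · rintro ⟨ho, hlt, hle⟩
    refine ⟨a :: c :: rest, ho, ?_⟩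
    obtain ⟨hl, hpre, hpost, hget⟩ := (pvMatchIff a c rest (a :: c :: rest)).mpr rfl
    rw [if_pos ⟨hl, hpre, hpost, by omega, by omega⟩, hget]

-- elements of pvCols lie strictly right of i
theorem pvColsGT (b a : Int) (rest : List Int) (obs : List (List Int)) (i c : Int)
    (h : c ∈ pvCols b a rest obs i) : i < c := ((pvMemCols b a rest obs i c).mp h).2.1

-- when the next square is free, the candidate set does not change
theorem pvColsStep (b a : Int) (rest : List Int) (obs : List (List Int)) (i : Int)
    (hnot : (a :: (i + 1) :: rest) ∉ obs) :
    pvCols b a rest obs i = pvCols b a rest obs (i + 1) := by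
  unfold pvCols
  apply List.filterMap_congr
  intro o ho
  by_cases hp : 2 ≤ o.length ∧ PySem.List.slice o none (some 1) = [a] ∧
      PySem.List.slice o (some 2) none = rest
  · obtain ⟨hl, hpre, hpost⟩ := hp
    have hv : o = a :: (PySem.List.pyGetD o 1 0) :: rest :=
      (pvMatchIff a _ rest o).mp ⟨hl, hpre, hpost, rfl⟩
    have hne : PySem.List.pyGetD o 1 0 ≠ i + 1 := by
      intro he; exact hnot (by rw [← he, ← hv]; exact ho)
    by_cases hb : i < PySem.List.pyGetD o 1 0 ∧ PySem.List.pyGetD o 1 0 ≤ b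
    · rw [if_pos ⟨hl, hpre, hpost, hb.1, hb.2⟩, if_pos ⟨hl, hpre, hpost, by omega, hb.2⟩]
    · rw [if_neg (by tauto), if_neg (by intro h; exact hb ⟨by omega, h.2.2.2.2⟩)]
  · rw [if_neg (by tauto), if_neg (by tauto)]

-- recurrence, hit case: an obstacle on the next square stops the count right here
theorem pvTailHit (b a : Int) (rest : List Int) (obs : List (List Int)) (i : Int)
    (hib : i < b) (hit : (a :: (i + 1) :: rest) ∈ obs) :
    pvTail b a rest obs i = 0 := by
  have hmem : (i + 1) ∈ pvCols b a rest obs i :=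
    (pvMemCols b a rest obs i (i + 1)).mpr ⟨hit, by omega, by omega⟩
  have hne : pvCols b a rest obs i ≠ [] := fun h => by simp [h] at hmem
  obtain ⟨c, hc⟩ : ∃ c, PySem.List.min? (pvCols b a rest obs i) (fun x => x) = some c := by
    cases h : PySem.List.min? (pvCols b a rest obs i) (fun x => x) with
    | none => exact absurd ((PySem.List.min?_eq_none_iff _ _).mp h) hne
    | some c => exact ⟨c, rfl⟩
  have hcmem := PySem.List.min?_mem hc
  have hle : c ≤ i + 1 := PySem.List.min?_isMin hc _ hmem
  have hgt : i < c := pvColsGT b a rest obs i c hcmem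
  unfold pvTail
  rw [if_neg (by omega), hc]
  show c - i - 1 = 0
  omega

-- recurrence, free case
theorem pvTailFree (b a : Int) (rest : List Int) (obs : List (List Int)) (i : Int)
    (hib : i < b) (hnot : (a :: (i + 1) :: rest) ∉ obs) :
    pvTail b a rest obs i = 1 + pvTail b a rest obs (i + 1) := by
  have hcols := pvColsStep b a rest obs i hnot
  unfold pvTail
  rw [if_neg (by omega), hcols]
  cases h : PySem.List.min? (pvCols b a rest obs (i + 1)) (fun x => x) with
  | none =>
    show b - i = 1 + if b ≤ i + 1 then 0 else b - (i + 1)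
    split <;> omega
  | some c =>
    have hgt : i + 1 < c := pvColsGT b a rest obs (i + 1) c (PySem.List.min?_mem h)
    have hle : c ≤ b := ((pvMemCols b a rest obs (i + 1) c).mp (PySem.List.min?_mem h)).2.2
    show c - i - 1 = 1 + if b ≤ i + 1 then 0 else c - (i + 1) - 1
    rw [if_neg (by omega)]
    omega

-- loop invariant: with q_position = a :: i :: rest, the loop adds B's tail count to m
theorem pvLoopEq (b : Int) (obs : List (List Int)) :
    ∀ (k : Nat) (a : Int) (rest : List Int) (m i : Int), (b - i).toNat = k →
      rigth_moveLoop b obs (a :: i :: rest) m i = m + pvTail b a rest obs i := by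
  intro k
  induction k with
  | zero =>
    intro a rest m i hk
    rw [rigth_moveLoop.eq_def, if_neg (by omega)]
    unfold pvTail
    rw [if_pos (by omega)]
    omega
  | succ n ih =>
    intro a rest m i hk
    have hib : i < b := by omega
    rw [rigth_moveLoop.eq_def, if_pos hib]
    have hset : (a :: i :: rest).set 1 (PySem.List.pyGetD (a :: i :: rest) 1 0 + 1)
        = a :: (i + 1) :: rest := by
      simp [PySem.List.pyGetD, PySem.List.pyGet?, PySem.List.pyIdx?, List.set]
    simp only [hset, pvInnerA_eq]
    by_cases hit : (a :: (i + 1) :: rest) ∈ obs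
    · rw [if_pos hit]
      rw [if_neg (by simp)]
      rw [rigth_moveLoop.eq_def, if_neg (by omega)]
      rw [pvTailHit b a rest obs i hib hit]
      omega
    · rw [if_neg hit]
      rw [if_pos (by omega)]
      rw [ih a rest (m + 1) (i + 1) (by omega)]
      rw [pvTailFree b a rest obs i hib hit]
      omega

-- B equals its tail-count form on a well-formed queen position
theorem pvAltEq (b a c : Int) (rest : List Int) (obs : List (List Int)) :
    rigth_move_alt b (a :: c :: rest) obs = pvTail b a rest obs c := by
  unfold rigth_move_alt pvTail pvCols
  have hqc : PySem.List.pyGetD (a :: c :: rest) 1 0 = c := by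
    simp [PySem.List.pyGetD, PySem.List.pyGet?, PySem.List.pyIdx?]
  have hpre : PySem.List.slice (a :: c :: rest) none (some 1) = [a] := by
    rw [PySem.List.slice_to _ (by norm_num)]; rfl
  have hpost : PySem.List.slice (a :: c :: rest) (some 2) none = rest := by
    rw [PySem.List.slice_from _ (by norm_num)]; rfl
  simp only [hqc, hpre, hpost]

-- ===== VERDICT (by name: the statement is the Claim_ definition above) =====
theorem rigth_move_spec : Claim_equal_rigth_move := by
  intro b q_p obs _ hpre
  unfold Pre_rigth_move at hpre
  match q_p, hpre with
  | a :: c :: rest, _ =>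
    unfold Spec_rigth_move rigth_move
    have hqc : PySem.List.pyGetD (a :: c :: rest) 1 0 = c := by
      simp [PySem.List.pyGetD, PySem.List.pyGet?, PySem.List.pyIdx?]
    simp only [hqc]
    rw [pvLoopEq b obs (b - c).toNat a rest 0 c rfl]
    rw [pvAltEq]
    omega
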